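-- pv_equiv track=rewrite | github.com/prarn/ComProg-1stYear | HW3.py | summarize_movies_by_genre
-- ===== SOURCE A (Python) =====
-- def summarize_movies_by_genre(movies):
--   movies_by_genre = dict()
--   # Your code here
--   for i in movies:
--     if movies[i]['genre'] not in movies_by_genre:
--       movies_by_genre[movies[i]['genre']]=[i]
--     else: movies_by_genre[movies[i]['genre']]+=[i]
--   for j in movies_by_genre: movies_by_genre[j].sort()
--   return movies_by_genre
-- ===== SOURCE B (Python) =====
-- def summarize_movies_by_genre(movies):
--   # One global sort of the keys instead of a per-genre sort: genres are listed
--   # (in first-appearance order, like A) by a dict comprehension, then the keys,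
--   # visited in ascending order, are appended to their genre's bucket, so each
--   # bucket is born sorted.
--   movies_by_genre = {movies[k]['genre']: [] for k in movies}
--   for key in sorted(movies):
--     movies_by_genre[movies[key]['genre']].append(key)
--   return movies_by_genre
-- ===== Notes on version B (the rewrite author's own statement) =====
-- stated objective: alternative
-- what changed: B sorts all keys once globally and appends them in ascending order into empty per-genre buckets created by a dict comprehension, so each bucket is born sorted, instead of A's grouping pass followed by an in-place sort of every genre's list.
import Mathlib
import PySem

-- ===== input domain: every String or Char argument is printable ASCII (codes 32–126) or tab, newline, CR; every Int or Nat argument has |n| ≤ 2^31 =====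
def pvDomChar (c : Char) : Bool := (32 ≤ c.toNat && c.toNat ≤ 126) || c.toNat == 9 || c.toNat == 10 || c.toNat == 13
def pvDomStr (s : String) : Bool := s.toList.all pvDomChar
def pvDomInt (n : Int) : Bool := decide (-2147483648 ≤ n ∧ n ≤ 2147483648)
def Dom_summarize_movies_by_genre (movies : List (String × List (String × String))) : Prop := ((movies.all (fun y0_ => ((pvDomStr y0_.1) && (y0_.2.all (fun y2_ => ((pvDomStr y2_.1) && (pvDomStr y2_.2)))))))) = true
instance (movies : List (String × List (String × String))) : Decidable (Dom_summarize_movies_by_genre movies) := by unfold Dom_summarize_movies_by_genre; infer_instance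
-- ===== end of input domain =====

-- B replaces A's per-genre sorts by one global sort of the keys (buckets filled in
-- ascending key order are born sorted); equivalence is about the RETURN value.

-- shared lookup helper: movies[i]['genre'] (getD is exact under Pre_, which
-- guarantees i is a key of movies and 'genre' a key of movies[i])
def pvGenre (movies : List (String × List (String × String))) (i : String) : String :=
  PySem.Dict.getD (PySem.Dict.mk (PySem.Dict.getD (PySem.Dict.mk movies) i [])) "genre" ""

-- ===== PORT A =====
def summarize_movies_by_genre (movies : List (String × List (String × String))) : List (String × List String) :=
  -- for i in movies: if g not in d: d[g] = [i] else d[g] += [i]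
  let d := movies.foldl (fun (d : PySem.Dict String (List String)) p =>
      if d.contains (pvGenre movies p.1) = false then d.insert (pvGenre movies p.1) [p.1]
      else d.modify (pvGenre movies p.1) [] (fun v => v ++ [p.1])) PySem.Dict.empty
  -- for j in d: d[j].sort()
  d.items.map (fun q => (q.1, PySem.List.sorted q.2 (fun x => x) false))

-- ===== PORT B =====
def summarize_movies_by_genre_alt (movies : List (String × List (String × String))) : List (String × List String) :=
  -- movies_by_genre = {movies[k]['genre']: [] for k in movies}
  let init := movies.foldl (fun (d : PySem.Dict String (List String)) p =>
      d.insert (pvGenre movies p.1) []) PySem.Dict.empty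
  -- for key in sorted(movies): movies_by_genre[movies[key]['genre']].append(key)
  let ks := PySem.List.sorted (movies.map Prod.fst) (fun x => x) false
  (ks.foldl (fun (d : PySem.Dict String (List String)) k =>
      d.modify (pvGenre movies k) [] (fun v => v ++ [k])) init).items

-- ===== PRECONDITION & SPEC =====
-- Pre_ excludes association lists with duplicate outer or inner-dict keys (a Python
-- dict cannot carry them, so assoc-list lookup on them is ambiguous) and inner dicts
-- lacking the 'genre' key, on which A raises KeyError.
def Pre_summarize_movies_by_genre (movies : List (String × List (String × String))) : Prop :=
  (movies.map Prod.fst).Nodup ∧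
  ∀ p ∈ movies, (p.2.map Prod.fst).Nodup ∧ "genre" ∈ p.2.map Prod.fst
instance (movies : List (String × List (String × String))) : Decidable (Pre_summarize_movies_by_genre movies) := by unfold Pre_summarize_movies_by_genre; infer_instance
def pvWitness_summarize_movies_by_genre : (List (String × List (String × String))) :=
  [("b", [("genre", "drama")]), ("a", [("genre", "drama"), ("year", "1999")]), ("c", [("genre", "sci-fi")])]

def Spec_summarize_movies_by_genre (movies : List (String × List (String × String))) (out : List (String × List String)) : Prop := out = summarize_movies_by_genre_alt movies
instance (movies : List (String × List (String × String))) (out : List (String × List String)) : Decidable (Spec_summarize_movies_by_genre movies out) := by unfold Spec_summarize_movies_by_genre; infer_instance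

-- ===== CLAIM (what is proved, stated in full; the proofs are below) =====
def Claim_equal_summarize_movies_by_genre : Prop := ∀ (movies : List (String × List (String × String))), Dom_summarize_movies_by_genre movies → Pre_summarize_movies_by_genre movies → Spec_summarize_movies_by_genre movies (summarize_movies_by_genre movies)

-- ===== LEMMAS AND PROOFS =====

lemma pv_step_eq (d : PySem.Dict String (List String)) (g i : String) :
    (if d.contains g = false then d.insert g [i] else d.modify g [] (fun v => v ++ [i]))
      = d.modify g [] (fun v => v ++ [i]) := by
  by_cases h : d.contains g = false
  · simp [h, PySem.Dict.modify, PySem.Dict.getD_of_not_contains d [] h]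
  · simp [h]

lemma pv_getD_init {β : Type} (l : List (String × β)) (key : String → String)
    (d : PySem.Dict String (List String)) (h : ∀ g, d.getD g [] = [])
    (g : String) :
    (l.foldl (fun d p => d.insert (key p.1) []) d).getD g [] = [] := by
  induction l generalizing d with
  | nil => exact h g
  | cons p t ih =>
      simp only [List.foldl_cons]
      exact ih _ (fun g' => by rw [PySem.Dict.getD_insert]; split <;> simp [h])

lemma pv_sorted_filter (keys : List String) (hnd : keys.Nodup) (P : String → Bool) :
    PySem.List.sorted (keys.filter P) (fun x => x) false
      = (PySem.List.sorted keys (fun x => x) false).filter P := by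
  apply PySem.List.sorted_eq_of_perm_of_pairwise_lt
  · exact (PySem.List.sorted_perm keys (fun x => x) false).filter P
  · have hnd' : (PySem.List.sorted keys (fun x => x) false).Nodup :=
      ((PySem.List.sorted_perm keys (fun x => x) false).nodup_iff).mpr hnd
    have hle := PySem.List.sorted_pairwise keys (fun x => x)
    exact ((hle.and hnd').imp (fun h => lt_of_le_of_ne h.1 h.2)).filter P

lemma pv_main {β : Type} (movies : List (String × β)) (G : String → String)
    (hnd : (movies.map Prod.fst).Nodup) :
    ((movies.foldl (fun (d : PySem.Dict String (List String)) p =>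
        if d.contains (G p.1) = false then d.insert (G p.1) [p.1]
        else d.modify (G p.1) [] (fun v => v ++ [p.1])) PySem.Dict.empty).items.map
      (fun q => (q.1, PySem.List.sorted q.2 (fun x => x) false)))
    = ((PySem.List.sorted (movies.map Prod.fst) (fun x => x) false).foldl
        (fun (d : PySem.Dict String (List String)) k => d.modify (G k) [] (fun v => v ++ [k]))
        (movies.foldl (fun (d : PySem.Dict String (List String)) p => d.insert (G p.1) []) PySem.Dict.empty)).items := by
  have hstep : (fun (d : PySem.Dict String (List String)) (p : String × β) =>
      if d.contains (G p.1) = false then d.insert (G p.1) [p.1]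
      else d.modify (G p.1) [] (fun v => v ++ [p.1]))
    = fun d p => d.modify (G p.1) [] (fun v => v ++ [p.1]) :=
    funext fun d => funext fun p => pv_step_eq d (G p.1) p.1
  rw [hstep]
  -- keys of dA
  have hkA : (movies.foldl (fun (d : PySem.Dict String (List String)) p =>
        d.modify (G p.1) [] (fun v => v ++ [p.1])) PySem.Dict.empty).keys
      = PySem.Set.ofList (movies.map (fun p => G p.1)) := by
    have h := PySem.Dict.keys_foldl_modify_key movies (fun p => G p.1) ([] : List String)
      (fun d p => fun v => v ++ [p.1]) PySem.Dict.empty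
    simpa [PySem.Dict.keys_empty, PySem.Set.update_nil_left] using h
  have hndA : (movies.foldl (fun (d : PySem.Dict String (List String)) p =>
        d.modify (G p.1) [] (fun v => v ++ [p.1])) PySem.Dict.empty).keys.Nodup := by
    rw [hkA]; exact PySem.Set.nodup_ofList _
  -- keys of init
  have hkI : (movies.foldl (fun (d : PySem.Dict String (List String)) p =>
        d.insert (G p.1) []) PySem.Dict.empty).keys
      = PySem.Set.ofList (movies.map (fun p => G p.1)) := by
    have h := PySem.Dict.keys_foldl_insert_key movies (fun p => G p.1)
      (fun _ _ => ([] : List String)) PySem.Dict.empty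
    simpa [PySem.Dict.keys_empty, PySem.Set.update_nil_left] using h
  -- keys of dB
  have hkB : ((PySem.List.sorted (movies.map Prod.fst) (fun x => x) false).foldl
        (fun (d : PySem.Dict String (List String)) k => d.modify (G k) [] (fun v => v ++ [k]))
        (movies.foldl (fun (d : PySem.Dict String (List String)) p => d.insert (G p.1) []) PySem.Dict.empty)).keys
      = PySem.Set.ofList (movies.map (fun p => G p.1)) := by
    have h := PySem.Dict.keys_foldl_modify_key
      (PySem.List.sorted (movies.map Prod.fst) (fun x => x) false) G ([] : List String)
      (fun d k => fun v => v ++ [k])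
      (movies.foldl (fun (d : PySem.Dict String (List String)) p => d.insert (G p.1) []) PySem.Dict.empty)
    rw [hkI, PySem.Set.update_eq_append_filter] at h
    have hfil : List.filter (fun y => !(PySem.Set.ofList (movies.map (fun p => G p.1))).contains y)
        (PySem.Set.ofList ((PySem.List.sorted (movies.map Prod.fst) (fun x => x) false).map G)) = [] := by
      apply List.filter_eq_nil_iff.mpr
      intro y hy
      rw [PySem.Set.mem_ofList] at hy
      obtain ⟨k, hk, rfl⟩ := List.mem_map.mp hy
      rw [PySem.List.mem_sorted] at hk
      obtain ⟨p, hp, rfl⟩ := List.mem_map.mp hk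
      have : (G p.1) ∈ PySem.Set.ofList (movies.map (fun p => G p.1)) :=
        (PySem.Set.mem_ofList _ _).mpr (List.mem_map_of_mem hp)
      simp only [PySem.Set.contains]
      simp [this]
    rw [hfil, List.append_nil] at h
    exact h
  have hndB : ((PySem.List.sorted (movies.map Prod.fst) (fun x => x) false).foldl
        (fun (d : PySem.Dict String (List String)) k => d.modify (G k) [] (fun v => v ++ [k]))
        (movies.foldl (fun (d : PySem.Dict String (List String)) p => d.insert (G p.1) []) PySem.Dict.empty)).keys.Nodup := by
    rw [hkB]; exact PySem.Set.nodup_ofList _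
  -- values of dA
  have hvA : ∀ g, (movies.foldl (fun (d : PySem.Dict String (List String)) p =>
        d.modify (G p.1) [] (fun v => v ++ [p.1])) PySem.Dict.empty).getD g []
      = (movies.map Prod.fst).filter (fun k => G k == g) := by
    intro g
    have h := PySem.Dict.getD_foldl_modify_append (movies.map (fun p => (G p.1, p.1)))
      PySem.Dict.empty g
    rw [List.foldl_map] at h
    simp only [List.filter_map, PySem.Dict.getD_empty, List.nil_append, List.map_map] at h
    rw [List.filter_map]
    simp only [Function.comp_def] at h ⊢
    simpa using h
  -- values of dB
  have hvB : ∀ g, ((PySem.List.sorted (movies.map Prod.fst) (fun x => x) false).foldl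
        (fun (d : PySem.Dict String (List String)) k => d.modify (G k) [] (fun v => v ++ [k]))
        (movies.foldl (fun (d : PySem.Dict String (List String)) p => d.insert (G p.1) []) PySem.Dict.empty)).getD g []
      = (PySem.List.sorted (movies.map Prod.fst) (fun x => x) false).filter (fun k => G k == g) := by
    intro g
    have h := PySem.Dict.getD_foldl_modify_append
      ((PySem.List.sorted (movies.map Prod.fst) (fun x => x) false).map (fun k => (G k, k)))
      (movies.foldl (fun (d : PySem.Dict String (List String)) p => d.insert (G p.1) []) PySem.Dict.empty) g
    rw [List.foldl_map] at h
    rw [pv_getD_init movies G PySem.Dict.empty (fun g' => by simp) g] at h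
    simp only [List.filter_map, List.nil_append, List.map_map] at h
    simp only [Function.comp_def] at h
    simpa using h
  -- assemble
  rw [PySem.Dict.items_eq_map_keys _ hndA [], PySem.Dict.items_eq_map_keys _ hndB [],
      hkA, hkB, List.map_map]
  apply List.map_congr_left
  intro g _
  simp only [Function.comp]
  rw [hvA, hvB, pv_sorted_filter _ hnd]

-- ===== VERDICT (by name: the statement is the Claim_ definition above) =====
theorem summarize_movies_by_genre_spec : Claim_equal_summarize_movies_by_genre := by
  intro movies _ hpre
  unfold Spec_summarize_movies_by_genre
  show summarize_movies_by_genre movies = summarize_movies_by_genre_alt movies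
  simp only [summarize_movies_by_genre, summarize_movies_by_genre_alt]
  exact pv_main movies (pvGenre movies) hpre.1
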